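-- pv_equiv track=rewrite | github.com/kim990401/baekjoon | 프로그래머스/3/12938. 최고의 집합/최고의 집합.py | solution
-- ===== SOURCE A (Python) =====
-- def solution(n, s):
--     answer = []
--     if n > s :
--         return [-1]
--     if s%n == 0 :
--         for i in range(n) :
--             answer.append(s//n)
--     else :
--         for i in range(n,0,-1) :
--             temp = s//i
--             s = s - temp
--             answer.append(temp)
--     return answer
-- ===== SOURCE B (Python) =====
-- def solution(n, s):
--     if n > s:
--         return [-1]
--     q, r = divmod(s, n)
--     return [q] * (n - r) + [q + 1] * r
-- ===== Notes on version B (the rewrite author's own statement) =====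
-- stated objective: simpler
-- what changed: B replaces A's two loops (a range(n) append loop and a greedy loop that repeatedly recomputes s//i and subtracts from a running s) by the closed form divmod(s,n) and builds the answer directly as [q]*(n-r)+[q+1]*r.
import Mathlib
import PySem

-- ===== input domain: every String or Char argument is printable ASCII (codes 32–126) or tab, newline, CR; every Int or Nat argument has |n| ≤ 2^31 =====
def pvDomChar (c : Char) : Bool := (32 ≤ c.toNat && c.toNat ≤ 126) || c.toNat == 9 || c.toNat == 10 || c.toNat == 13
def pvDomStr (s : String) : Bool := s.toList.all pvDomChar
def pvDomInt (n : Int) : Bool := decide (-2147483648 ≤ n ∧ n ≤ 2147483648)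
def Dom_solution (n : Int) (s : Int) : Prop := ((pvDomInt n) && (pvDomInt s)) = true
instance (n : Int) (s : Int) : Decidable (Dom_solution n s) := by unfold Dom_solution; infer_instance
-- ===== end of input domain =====

-- B builds the answer from divmod(s,n) in closed form instead of A's two subtracting loops (objective: simpler).

-- ===== PORT A =====
def solution (n : Int) (s : Int) : List Int :=
  if n > s then [-1]
  else if PySem.Int.mod s n = 0 then
    (PySem.List.pyRange 0 n 1).foldl
      (fun answer _ => answer ++ [PySem.Int.floordiv s n]) []
  else
    ((PySem.List.pyRange n 0 (-1)).foldl
      (fun (st : Int × List Int) i =>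
        let temp := PySem.Int.floordiv st.1 i
        (st.1 - temp, st.2 ++ [temp])) (s, [])).2

-- ===== PORT B =====
def solution_alt (n : Int) (s : Int) : List Int :=
  if n > s then [-1]
  else
    let q := PySem.Int.floordiv s n
    let r := PySem.Int.mod s n
    List.replicate (n - r).toNat q ++ List.replicate r.toNat (q + 1)

-- ===== PRECONDITION & SPEC =====
-- Pre_ excludes exactly n = 0 with 0 ≤ s, where Python's `s % n` raises ZeroDivisionError
-- (both A and B raise there; for n = 0 with s < 0 the `n > s` guard returns first).
def Pre_solution (n : Int) (s : Int) : Prop := ¬ (n = 0 ∧ 0 ≤ s)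
instance (n : Int) (s : Int) : Decidable (Pre_solution n s) := by unfold Pre_solution; infer_instance
def pvWitness_solution : Int × Int := (3, 7)

def Spec_solution (n : Int) (s : Int) (out : List Int) : Prop := out = solution_alt n s
instance (n : Int) (s : Int) (out : List Int) : Decidable (Spec_solution n s out) := by unfold Spec_solution; infer_instance

-- ===== CLAIM (what is proved, stated in full; the proofs are below) =====
def Claim_equal_solution : Prop := ∀ (n : Int) (s : Int), Dom_solution n s → Pre_solution n s → Spec_solution n s (solution n s)

-- ===== LEMMAS AND PROOFS =====

-- A's greedy else-loop, written as structural recursion on the loop counter (proof helper only).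
def runA : Nat → Int → List Int
  | 0, _ => []
  | k+1, s => PySem.Int.floordiv s (k+1) :: runA k (s - PySem.Int.floordiv s (k+1))

lemma pyRange_neg_one_eval (n : Int) (h : 0 < n) :
    PySem.List.pyRange n 0 (-1) = (List.range n.toNat).map (fun k : Nat => n + -1 * (k:Int)) := by
  simp only [PySem.List.pyRange]
  rw [if_neg (show ¬((-1:Int) = 0) by norm_num), if_neg (show ¬((0:Int) < -1) by norm_num),
    if_pos h]
  congr 2
  norm_num

lemma pyRange_neg_one_nil (n : Int) (h : n ≤ 0) :
    PySem.List.pyRange n 0 (-1) = [] := by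
  simp only [PySem.List.pyRange]
  rw [if_neg (show ¬((-1:Int) = 0) by norm_num), if_neg (show ¬((0:Int) < -1) by norm_num),
    if_neg (by omega)]
  simp

lemma pyRange_neg_one_cons (n : Int) (h : 0 < n) :
    PySem.List.pyRange n 0 (-1) = n :: PySem.List.pyRange (n-1) 0 (-1) := by
  rw [pyRange_neg_one_eval n h]
  have hm : n.toNat = (n-1).toNat + 1 := by omega
  rw [hm, List.range_succ_eq_map]
  simp only [List.map_cons, List.map_map, Nat.cast_zero]
  refine List.cons_eq_cons.mpr ⟨by ring, ?_⟩
  by_cases h1 : 0 < n - 1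
  · rw [pyRange_neg_one_eval _ h1]
    apply List.map_congr_left
    intro k _
    simp only [Function.comp_apply]
    push_cast
    ring
  · have h2 : (n-1).toNat = 0 := by omega
    rw [pyRange_neg_one_nil _ (by omega), h2]
    simp

lemma loopA_eq : ∀ (k : Nat) (s : Int) (acc : List Int),
    ((PySem.List.pyRange (k:Int) 0 (-1)).foldl
      (fun (st : Int × List Int) i =>
        let temp := PySem.Int.floordiv st.1 i
        (st.1 - temp, st.2 ++ [temp])) (s, acc)).2 = acc ++ runA k s := by
  intro k
  induction k with
  | zero =>
    intro s acc
    rw [show ((0:Nat):Int) = 0 by norm_num, pyRange_neg_one_nil 0 le_rfl]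
    simp [runA]
  | succ m ih =>
    intro s acc
    have hc : PySem.List.pyRange ((m+1 : Nat) : Int) 0 (-1)
        = ((m+1 : Nat) : Int) :: PySem.List.pyRange ((m : Nat) : Int) 0 (-1) := by
      rw [pyRange_neg_one_cons ((m+1 : Nat) : Int) (by positivity)]
      congr 2
      push_cast
      ring
    rw [hc]
    simp only [List.foldl_cons]
    rw [ih]
    simp [runA]

-- divmod characterisation of one greedy step: with s = q*k + r, the first element is q
-- and the remaining sum has quotient/remainder (q, r) when r < k - 1, else (q+1, 0).
lemma runA_closed : ∀ (k : Nat), 0 < k → ∀ (s : Int),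
    runA k s = List.replicate ((k : Int) - PySem.Int.mod s k).toNat (PySem.Int.floordiv s k)
      ++ List.replicate (PySem.Int.mod s k).toNat (PySem.Int.floordiv s k + 1) := by
  intro k
  induction k with
  | zero => omega
  | succ m ih =>
    intro _ s
    by_cases hm : m = 0
    · subst hm
      simp [runA]
    · have hmp : 0 < m := Nat.pos_of_ne_zero hm
      have hmI : (0:Int) < (m : Int) := by exact_mod_cast hmp
      rw [runA]
      push_cast
      set q := PySem.Int.floordiv s ((m:Int) + 1) with hq
      set r := PySem.Int.mod s ((m:Int) + 1) with hr
      have hqr : q * ((m:Int) + 1) + r = s := PySem.Int.floordiv_mul_add_mod s ((m:Int) + 1)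
      have hr0 : 0 ≤ r := PySem.Int.mod_nonneg s (by omega)
      have hr1 : r < (m:Int) + 1 := PySem.Int.mod_lt s (by omega)
      by_cases hcase : r < (m:Int)
      · -- remainder survives: the tail has quotient q and remainder r again
        have hq' : PySem.Int.floordiv (s - q) ((m:Int)) = q := by
          rw [PySem.Int.floordiv_eq_iff_of_pos hmI]
          constructor
          · nlinarith [hqr, hr0]
          · nlinarith [hqr, hcase]
        have hr' : PySem.Int.mod (s - q) ((m:Int)) = r := by
          have h := PySem.Int.floordiv_mul_add_mod (s - q) ((m:Int))
          rw [hq'] at h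
          linear_combination h - hqr
        rw [ih hmp (s - q), hq', hr']
        have hrepl : ((m:Int) + 1 - r).toNat = ((m:Int) - r).toNat + 1 := by omega
        rw [hrepl, List.replicate_succ]
        simp
      · -- remainder r = m : the tail is all (q+1)'s
        have hreq : r = (m:Int) := by omega
        have hq' : PySem.Int.floordiv (s - q) ((m:Int)) = q + 1 := by
          rw [PySem.Int.floordiv_eq_iff_of_pos hmI]
          constructor
          · nlinarith [hqr, hreq]
          · nlinarith [hqr, hreq, hmI]
        have hr' : PySem.Int.mod (s - q) ((m:Int)) = 0 := by
          have h := PySem.Int.floordiv_mul_add_mod (s - q) ((m:Int))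
          rw [hq'] at h
          linear_combination h - hqr + hreq
        rw [ih hmp (s - q), hq', hr']
        have h1 : ((m:Int) - 0).toNat = m := by omega
        have h2 : ((m:Int) + 1 - r).toNat = 1 := by omega
        have h3 : r.toNat = m := by omega
        rw [h1, h2, h3]
        simp [List.replicate_succ]

-- ===== VERDICT (by name: the statement is the Claim_ definition above) =====
theorem solution_spec : Claim_equal_solution := by
  intro n s _ hpre
  unfold Spec_solution solution solution_alt
  by_cases hgt : n > s
  · simp [hgt]
  · simp only [if_neg hgt]
    have hn0 : n ≠ 0 := by
      intro h; subst h
      exact hpre ⟨rfl, by omega⟩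
    by_cases hnpos : 0 < n
    · set q := PySem.Int.floordiv s n with hq
      set r := PySem.Int.mod s n with hr
      have hr0 : 0 ≤ r := PySem.Int.mod_nonneg s hnpos
      have hr1 : r < n := PySem.Int.mod_lt s hnpos
      by_cases hmod : r = 0
      · rw [if_pos hmod]
        rw [PySem.List.foldl_append_singleton_eq_map]
        rw [hmod]
        have hlen : (PySem.List.pyRange 0 n 1).length = n.toNat := by
          rw [PySem.List.length_pyRange_one]; omega
        have : (PySem.List.pyRange 0 n 1).map (fun _ => q) = List.replicate n.toNat q := by
          rw [List.map_const', hlen]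
        rw [this]
        simp
      · rw [if_neg hmod]
        have hn : n = ((n.toNat : Nat) : Int) := by omega
        rw [hn]
        rw [loopA_eq n.toNat s []]
        rw [runA_closed n.toNat (by omega) s]
        rw [← hn, ← hq, ← hr]
        simp
    · -- n < 0 : A's loops are empty, and B's replicate counts are both 0
      have hneg : n < 0 := by omega
      have hb : n < PySem.Int.mod s n ∧ PySem.Int.mod s n ≤ 0 :=
        PySem.Int.mod_neg_bounds s hneg
      have h1 : ((n - PySem.Int.mod s n).toNat) = 0 := by omega
      have h2 : ((PySem.Int.mod s n).toNat) = 0 := by omega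
      rw [h1, h2]
      by_cases hmod : PySem.Int.mod s n = 0
      · rw [if_pos hmod]
        have : PySem.List.pyRange 0 n 1 = [] := by
          rw [PySem.List.pyRange_one]
          have : (n - 0).toNat = 0 := by omega
          rw [this]; simp
        rw [this]; simp
      · rw [if_neg hmod]
        rw [pyRange_neg_one_nil n (by omega)]
        simp
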